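-- pv_equiv track=rewrite | github.com/bogdan-kulynych/transplantbenefit | transplantbenefit/encoder.py | make_rdisease_vec
-- ===== SOURCE A (Python) =====
-- def group2dummy(group: int, length: int) -> list:
--     """
--     Dummy encoder.
--
--     params:
--         group: group indicator (starts at 1!)
--         length: number of groups
--     """
--     group = int(group)
--     if group > length:
--         raise ValueError("Group must be an integer less than or equal to length")
--     out = [0] * (length - 1)
--     if group > 1:
--         out[group - 2] = 1
--     return out
--
-- def make_rdisease_vec(
--     rdisease_primary_tbs, rdisease_secondary_tbs, rdisease_tertiary_tbs, previous_tx_tbs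
-- ):
--     rdisease_primary_tbs = int(rdisease_primary_tbs)
--     rdisease_secondary_tbs = int(rdisease_secondary_tbs)
--     rdisease_tertiary_tbs = int(rdisease_tertiary_tbs)
--     if previous_tx_tbs > 0:
--         result = 10
--     elif any(
--         x == 1
--         for x in [rdisease_primary_tbs, rdisease_secondary_tbs, rdisease_tertiary_tbs]
--     ):
--         result = 1
--     elif any(
--         x == 2
--         for x in [rdisease_primary_tbs, rdisease_secondary_tbs, rdisease_tertiary_tbs]
--     ):
--         result = 2
--     elif any(
--         x == 3
--         for x in [rdisease_primary_tbs, rdisease_secondary_tbs, rdisease_tertiary_tbs]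
--     ):
--         result = 3
--     elif any(
--         x == 4
--         for x in [rdisease_primary_tbs, rdisease_secondary_tbs, rdisease_tertiary_tbs]
--     ):
--         result = 4
--     elif any(
--         x == 5
--         for x in [rdisease_primary_tbs, rdisease_secondary_tbs, rdisease_tertiary_tbs]
--     ):
--         result = 5
--     elif any(
--         x == 6
--         for x in [rdisease_primary_tbs, rdisease_secondary_tbs, rdisease_tertiary_tbs]
--     ):
--         result = 6
--     elif any(
--         x == 7
--         for x in [rdisease_primary_tbs, rdisease_secondary_tbs, rdisease_tertiary_tbs]
--     ):
--         result = 7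
--     elif any(
--         x == 8
--         for x in [rdisease_primary_tbs, rdisease_secondary_tbs, rdisease_tertiary_tbs]
--     ):
--         result = 8
--     else:
--         result = 9
--
--     out = group2dummy(result, 10)
--     return out[:1] + out[2:]  # Remove disease group 3
-- ===== SOURCE B (Python) =====
-- def make_rdisease_vec(
--     rdisease_primary_tbs, rdisease_secondary_tbs, rdisease_tertiary_tbs, previous_tx_tbs
-- ):
--     if previous_tx_tbs > 0:
--         result = 10
--     else:
--         matched = [
--             x
--             for x in (
--                 int(rdisease_primary_tbs),
--                 int(rdisease_secondary_tbs),
--                 int(rdisease_tertiary_tbs),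
--             )
--             if 1 <= x <= 8
--         ]
--         result = min(matched) if matched else 9
--     # Dummy-encode over the retained groups directly (group 1 is baseline, group 3 removed)
--     return [int(result == g) for g in (2, 4, 5, 6, 7, 8, 9, 10)]
-- ===== Notes on version B (the rewrite author's own statement) =====
-- stated objective: simpler
-- what changed: Replaces the eight repeated any-scans with a single min over the values filtered to 1..8, and builds the 8-element dummy vector directly as an indicator over the retained groups (2,4,5,6,7,8,9,10) instead of going through group2dummy plus slicing.
import Mathlib
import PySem

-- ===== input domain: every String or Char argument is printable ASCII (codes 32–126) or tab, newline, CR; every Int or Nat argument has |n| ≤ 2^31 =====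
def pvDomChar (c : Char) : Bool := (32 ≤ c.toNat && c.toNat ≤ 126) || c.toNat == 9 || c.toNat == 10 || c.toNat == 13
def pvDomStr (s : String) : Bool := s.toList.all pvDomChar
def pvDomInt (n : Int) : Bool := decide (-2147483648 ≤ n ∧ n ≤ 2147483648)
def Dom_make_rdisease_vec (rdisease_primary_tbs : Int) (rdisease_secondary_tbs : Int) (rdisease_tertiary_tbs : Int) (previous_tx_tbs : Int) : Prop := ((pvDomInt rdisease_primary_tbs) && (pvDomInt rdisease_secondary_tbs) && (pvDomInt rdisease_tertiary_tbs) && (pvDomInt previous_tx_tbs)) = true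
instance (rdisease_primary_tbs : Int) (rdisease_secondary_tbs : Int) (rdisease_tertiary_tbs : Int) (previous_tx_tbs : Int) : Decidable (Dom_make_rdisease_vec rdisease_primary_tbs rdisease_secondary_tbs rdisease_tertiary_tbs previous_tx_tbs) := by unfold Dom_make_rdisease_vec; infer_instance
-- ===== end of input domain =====

-- B replaces A's eight repeated any-scans with one min over the values filtered to 1..8 and
-- emits the dummy vector directly as an indicator over the retained groups (objective: simpler).

-- ===== PORT A =====
-- group2dummy: `raise ValueError` is `none`; `out[group - 2] = 1` is `List.set` — the
-- `group > 1` guard makes the index nonnegative, so `.toNat` is exact here.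
def group2dummyA (group : Int) (length : Int) : Option (List Int) :=
  if group > length then none
  else
    let out : List Int := List.replicate (length - 1).toNat 0
    if group > 1 then some (out.set (group - 2).toNat 1) else some out

-- the `result = …` if/elif chain of A (each `any(x == k for x in [...])` is the disjunction)
def resultA (p : Int) (s : Int) (t : Int) (prev : Int) : Int :=
  if prev > 0 then 10
  else if p = 1 ∨ s = 1 ∨ t = 1 then 1
  else if p = 2 ∨ s = 2 ∨ t = 2 then 2
  else if p = 3 ∨ s = 3 ∨ t = 3 then 3
  else if p = 4 ∨ s = 4 ∨ t = 4 then 4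
  else if p = 5 ∨ s = 5 ∨ t = 5 then 5
  else if p = 6 ∨ s = 6 ∨ t = 6 then 6
  else if p = 7 ∨ s = 7 ∨ t = 7 then 7
  else if p = 8 ∨ s = 8 ∨ t = 8 then 8
  else 9

def make_rdisease_vec (rdisease_primary_tbs : Int) (rdisease_secondary_tbs : Int) (rdisease_tertiary_tbs : Int) (previous_tx_tbs : Int) : List Int :=
  match group2dummyA (resultA rdisease_primary_tbs rdisease_secondary_tbs rdisease_tertiary_tbs previous_tx_tbs) 10 with
  | none => []  -- ValueError branch (unreachable: result ≤ 10)
  | some out => out.take 1 ++ out.drop 2  -- out[:1] + out[2:]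

-- ===== PORT B =====
-- `min(matched) if matched else 9`
def resultB (p : Int) (s : Int) (t : Int) (prev : Int) : Int :=
  if prev > 0 then 10
  else
    let matched := [p, s, t].filter (fun x => decide (1 ≤ x ∧ x ≤ 8))
    match PySem.List.min? matched (fun x => x) with
    | some m => m
    | none => 9

def make_rdisease_vec_alt (rdisease_primary_tbs : Int) (rdisease_secondary_tbs : Int) (rdisease_tertiary_tbs : Int) (previous_tx_tbs : Int) : List Int :=
  let result := resultB rdisease_primary_tbs rdisease_secondary_tbs rdisease_tertiary_tbs previous_tx_tbs
  ([2, 4, 5, 6, 7, 8, 9, 10] : List Int).map (fun g => if result = g then (1 : Int) else 0)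

-- ===== PRECONDITION & SPEC =====
def Spec_make_rdisease_vec (rdisease_primary_tbs : Int) (rdisease_secondary_tbs : Int) (rdisease_tertiary_tbs : Int) (previous_tx_tbs : Int) (out : List Int) : Prop := out = make_rdisease_vec_alt rdisease_primary_tbs rdisease_secondary_tbs rdisease_tertiary_tbs previous_tx_tbs
instance (rdisease_primary_tbs : Int) (rdisease_secondary_tbs : Int) (rdisease_tertiary_tbs : Int) (previous_tx_tbs : Int) (out : List Int) : Decidable (Spec_make_rdisease_vec rdisease_primary_tbs rdisease_secondary_tbs rdisease_tertiary_tbs previous_tx_tbs out) := by unfold Spec_make_rdisease_vec; infer_instance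

-- ===== CLAIM (what is proved, stated in full; the proofs are below) =====
def Claim_equal_make_rdisease_vec : Prop := ∀ (rdisease_primary_tbs : Int) (rdisease_secondary_tbs : Int) (rdisease_tertiary_tbs : Int) (previous_tx_tbs : Int), Dom_make_rdisease_vec rdisease_primary_tbs rdisease_secondary_tbs rdisease_tertiary_tbs previous_tx_tbs → Spec_make_rdisease_vec rdisease_primary_tbs rdisease_secondary_tbs rdisease_tertiary_tbs previous_tx_tbs (make_rdisease_vec rdisease_primary_tbs rdisease_secondary_tbs rdisease_tertiary_tbs previous_tx_tbs)

-- ===== LEMMAS AND PROOFS =====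

def clampG (x : Int) : Int := if 1 ≤ x ∧ x ≤ 8 then x else 9

lemma rB_char (p s t prev : Int) (hprev : ¬ prev > 0) :
    resultB p s t prev = min (min (clampG p) (clampG s)) (clampG t) := by
  by_cases hp : 1 ≤ p ∧ p ≤ 8 <;> by_cases hs : 1 ≤ s ∧ s ≤ 8 <;> by_cases ht : 1 ≤ t ∧ t ≤ 8 <;>
    simp [resultB, clampG, hprev, hp, hs, ht, List.filter, PySem.List.min?] <;>
    (first | omega |
      (split_ifs <;> dsimp only <;> (try split_ifs) <;> (try dsimp only) <;> omega))

lemma result_eq (p s t prev : Int) : resultA p s t prev = resultB p s t prev := by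
  by_cases hprev : prev > 0
  · simp [resultA, resultB, hprev]
  · rw [rB_char p s t prev hprev]
    unfold resultA clampG
    simp only [if_neg hprev]
    split_ifs <;> omega

lemma resultA_bounds (p s t prev : Int) :
    1 ≤ resultA p s t prev ∧ resultA p s t prev ≤ 10 := by
  unfold resultA; split_ifs <;> omega

lemma encode_eq (r : Int) (h1 : 1 ≤ r) (h2 : r ≤ 10) :
    (match group2dummyA r 10 with
      | none => ([] : List Int)
      | some out => out.take 1 ++ out.drop 2)
    = ([2, 4, 5, 6, 7, 8, 9, 10] : List Int).map (fun g => if r = g then (1 : Int) else 0) := by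
  interval_cases r <;> decide

-- ===== VERDICT (by name: the statement is the Claim_ definition above) =====
theorem make_rdisease_vec_spec : Claim_equal_make_rdisease_vec := by
  intro p s t prev _
  unfold Spec_make_rdisease_vec make_rdisease_vec make_rdisease_vec_alt
  rw [← result_eq]
  exact encode_eq _ (resultA_bounds p s t prev).1 (resultA_bounds p s t prev).2
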